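-- pv_equiv track=rewrite | github.com/elliotttmiller/ConstructAI | constructai/ai/recommender.py | _count_repetitive_elements
-- ===== SOURCE A (Python) =====
-- from typing import Dict, List, Any
--
-- def _count_repetitive_elements(tasks: List[Dict]) -> int:
--     """Count repetitive task patterns."""
--     task_names = [t.get("name", "") for t in tasks]
--     repetitive = 0
--
--     # Simple check for similar names
--     seen = {}
--     for name in task_names:
--         base_name = name.split()[0] if name else ""
--         if base_name in seen:
--             repetitive += 1
--         seen[base_name] = True
--
--     return repetitive
-- ===== SOURCE B (Python) =====
-- from typing import Dict, List, Any
--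
-- def _count_repetitive_elements(tasks: List[Dict]) -> int:
--     """Count repetitive task patterns: sort the base names, then count
--     adjacent equal pairs (each repeat of a base lands next to an earlier
--     copy after sorting)."""
--     base_names = sorted(
--         (t.get("name", "").split()[0] if t.get("name", "") else "")
--         for t in tasks
--     )
--     return sum(1 for prev, cur in zip(base_names, base_names[1:]) if prev == cur)
-- ===== Notes on version B (the rewrite author's own statement) =====
-- stated objective: alternative
-- what changed: A's single pass with a seen-dict and a running counter is replaced by a sort-then-scan: sort the extracted base names and count adjacent equal pairs, correct because sorting puts every repeated base next to an earlier copy.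
import Mathlib
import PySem

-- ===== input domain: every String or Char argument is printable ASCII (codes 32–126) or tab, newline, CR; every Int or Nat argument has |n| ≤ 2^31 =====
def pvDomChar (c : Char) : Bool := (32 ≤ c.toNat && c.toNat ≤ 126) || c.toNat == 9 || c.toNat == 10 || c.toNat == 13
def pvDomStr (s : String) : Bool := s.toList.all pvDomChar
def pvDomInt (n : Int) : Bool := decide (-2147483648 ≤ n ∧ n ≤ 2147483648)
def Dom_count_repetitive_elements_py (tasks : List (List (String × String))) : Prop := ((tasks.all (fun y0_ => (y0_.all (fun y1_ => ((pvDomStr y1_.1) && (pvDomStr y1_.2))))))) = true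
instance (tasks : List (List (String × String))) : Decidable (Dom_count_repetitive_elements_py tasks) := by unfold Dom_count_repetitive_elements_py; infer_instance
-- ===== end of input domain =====

-- B replaces A's seen-dict counting pass by sort-then-scan: sort the base names and count adjacent equal pairs (alternative algorithm, O(n log n)).


-- ===== PORT A =====
-- base_name = name.split()[0] if name else "";  xs[0] is ported totally as pyGetD _ 0 ""
-- (the IndexError case, a non-empty all-whitespace name, is excluded by Pre_ below).
def count_repetitive_elements_py (tasks : List (List (String × String))) : Int :=
  let task_names := tasks.map (fun t => (PySem.Dict.mk t).getD "name" "")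
  let st := task_names.foldl
    (fun (st : PySem.Dict String Bool × Int) name =>
      let base_name := if name ≠ "" then PySem.List.pyGetD (PySem.Str.split₀ name) 0 "" else ""
      let repetitive := if st.1.contains base_name then st.2 + 1 else st.2
      (st.1.insert base_name true, repetitive))
    (PySem.Dict.empty, 0)
  st.2

-- ===== PORT B =====
-- same verbatim extraction of the base name; bases sorted, then adjacent equal pairs counted
def count_repetitive_elements_py_alt (tasks : List (List (String × String))) : Int :=
  let base_names := PySem.List.sorted (tasks.map (fun t =>
    let name := (PySem.Dict.mk t).getD "name" ""
    if name ≠ "" then PySem.List.pyGetD (PySem.Str.split₀ name) 0 "" else "")) (fun x => x) false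
  (base_names.zip (PySem.List.slice base_names (some 1) none)).foldl
    (fun (acc : Int) p => if p.1 = p.2 then acc + 1 else acc) 0

-- ===== PRECONDITION & SPEC =====
-- Pre_ excludes exactly the inputs on which A (and B alike) raises IndexError:
-- a task whose "name" value is non-empty but consists only of whitespace, so name.split() is empty.
def Pre_count_repetitive_elements_py (tasks : List (List (String × String))) : Prop :=
  ∀ t ∈ tasks, (PySem.Dict.mk t).getD "name" "" = "" ∨
    PySem.Str.split₀ ((PySem.Dict.mk t).getD "name" "") ≠ []
instance (tasks : List (List (String × String))) : Decidable (Pre_count_repetitive_elements_py tasks) := by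
  unfold Pre_count_repetitive_elements_py; infer_instance

def pvWitness_count_repetitive_elements_py : (List (List (String × String))) :=
  [[("name", "dig foundation")], [("name", "dig trench"), ("owner", "bob")], [], [("name", "")]]

def Spec_count_repetitive_elements_py (tasks : List (List (String × String))) (out : Int) : Prop := out = count_repetitive_elements_py_alt tasks
instance (tasks : List (List (String × String))) (out : Int) : Decidable (Spec_count_repetitive_elements_py tasks out) := by unfold Spec_count_repetitive_elements_py; infer_instance

-- ===== CLAIM (what is proved, stated in full; the proofs are below) =====
def Claim_equal_count_repetitive_elements_py : Prop := ∀ (tasks : List (List (String × String))), Dom_count_repetitive_elements_py tasks → Pre_count_repetitive_elements_py tasks → Spec_count_repetitive_elements_py tasks (count_repetitive_elements_py tasks)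

-- ===== LEMMAS AND PROOFS =====

-- A's loop invariant: with the dict's key set mirrored by the Set s, the counter plus the
-- number of distinct bases equals the number of names processed (plus the offsets r, s.length).
lemma loop_counts (f : String → String) :
    ∀ (l : List String) (d : PySem.Dict String Bool) (r : Int) (s : PySem.Set String),
      (∀ x, d.contains x = true ↔ x ∈ s) →
      (l.foldl
        (fun (st : PySem.Dict String Bool × Int) name =>
          (st.1.insert (f name) true,
            if st.1.contains (f name) then st.2 + 1 else st.2)) (d, r)).2
        + ((l.foldl (fun s name => PySem.Set.add s (f name)) s).length : Int)
      = r + l.length + s.length := by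
  intro l
  induction l with
  | nil => intro d r s _; simp
  | cons x l ih =>
    intro d r s hinv
    simp only [List.foldl_cons, List.length_cons]
    by_cases hc : d.contains (f x) = true
    · have hmem : f x ∈ s := (hinv (f x)).mp hc
      have hadd : PySem.Set.add s (f x) = s := by
        simp [PySem.Set.add, PySem.Set.contains_eq_listContains, hmem]
      rw [hc, if_pos rfl, hadd]
      have := ih (d.insert (f x) true) (r + 1) s (by
        intro y
        rw [PySem.Dict.contains_insert]
        constructor
        · intro h
          rcases Bool.or_eq_true_iff.mp h with h | h
          · have : y = f x := by simpa using h
            simpa [this] using hmem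
          · exact (hinv y).mp h
        · intro h; exact Bool.or_eq_true_iff.mpr (Or.inr ((hinv y).mpr h)))
      rw [this]; push_cast; ring
    · have hmem : f x ∉ s := fun h => hc ((hinv (f x)).mpr h)
      have hadd : PySem.Set.add s (f x) = s ++ [f x] := by
        simp [PySem.Set.add, PySem.Set.contains_eq_listContains, hmem]
      rw [if_neg hc, hadd]
      have := ih (d.insert (f x) true) r (s ++ [f x]) (by
        intro y
        rw [PySem.Dict.contains_insert]
        constructor
        · intro h
          rcases Bool.or_eq_true_iff.mp h with h | h
          · have : y = f x := by simpa using h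
            simp [this]
          · simp [(hinv y).mp h]
        · intro h
          rcases List.mem_append.mp h with h | h
          · exact Bool.or_eq_true_iff.mpr (Or.inr ((hinv y).mpr h))
          · exact Bool.or_eq_true_iff.mpr (Or.inl (by simpa using h)))
      rw [this]; simp [List.length_append]; ring

-- the shared base-name extraction
def pvBase (name : String) : String :=
  if name ≠ "" then PySem.List.pyGetD (PySem.Str.split₀ name) 0 "" else ""

lemma ofList_eq_foldl' (l : List String) :
    PySem.Set.ofList (l.map pvBase) = l.foldl (fun s name => PySem.Set.add s (pvBase name)) [] := by
  rw [PySem.Set.ofList_eq_foldl, List.foldl_map]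

-- A's value: total names minus number of distinct base names
lemma A_eq (l : List String) :
    (l.foldl (fun (st : PySem.Dict String Bool × Int) name =>
        (st.1.insert (pvBase name) true,
          if st.1.contains (pvBase name) then st.2 + 1 else st.2))
      (PySem.Dict.empty, 0)).2
    = (l.length : Int) - ((PySem.Set.ofList (l.map pvBase)).length : Int) := by
  have h := loop_counts pvBase l PySem.Dict.empty 0 [] (by
    intro x; simp [PySem.Dict.contains_empty])
  rw [← ofList_eq_foldl'] at h
  simp only [List.length_nil, Nat.cast_zero, add_zero, zero_add] at h
  omega

-- number of distinct elements as a Finset cardinality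
lemma ofList_length_eq_card (l : List String) :
    (PySem.Set.ofList l).length = l.toFinset.card := by
  have h1 : (PySem.Set.ofList l).toFinset = l.toFinset := by
    ext x; simp [PySem.Set.mem_ofList]
  rw [← h1]
  exact (List.toFinset_card_of_nodup (PySem.Set.nodup_ofList l)).symm

-- on a ≤-sorted list, adjacent equal pairs + distinct elements = length
lemma adj_plus_distinct :
    ∀ (l : List String), l.Pairwise (· ≤ ·) →
      ((l.zip l.tail).countP (fun p => decide (p.1 = p.2))) + l.toFinset.card = l.length := by
  intro l
  induction l with
  | nil => intro _; simp
  | cons x t ih =>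
    intro hp
    cases t with
    | nil => simp
    | cons y t' =>
      have hp' : (y :: t').Pairwise (· ≤ ·) := hp.tail
      have ihr := ih hp'
      have hxy : x ≤ y := (List.pairwise_cons.mp hp).1 y (by simp)
      have hzip : ((x :: y :: t').zip (x :: y :: t').tail).countP (fun p => decide (p.1 = p.2))
          = ((y :: t').zip (y :: t').tail).countP (fun p => decide (p.1 = p.2))
            + (if x = y then 1 else 0) := by
        simp [List.countP_cons]
      by_cases hxy_eq : x = y
      · have hfin : (x :: y :: t').toFinset = (y :: t').toFinset := by
          subst hxy_eq; simp
        rw [List.length_cons, hzip, hfin, if_pos hxy_eq]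
        omega
      · have hxmem : x ∉ y :: t' := by
          intro hmem
          rcases List.mem_cons.mp hmem with h | h
          · exact hxy_eq h
          · have hyx : y ≤ x := (List.pairwise_cons.mp hp').1 x h
            exact hxy_eq (le_antisymm hxy hyx)
        have hfin : (x :: y :: t').toFinset.card = (y :: t').toFinset.card + 1 := by
          rw [show (x :: y :: t').toFinset = insert x (y :: t').toFinset from by simp]
          rw [Finset.card_insert_of_notMem (by simpa using hxmem)]
        rw [List.length_cons, hzip, if_neg hxy_eq]
        omega

-- B's fold is the adjacent-equal count, cast to Int
lemma B_fold_eq_countP (l : List String) :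
    ((l.zip l.tail).foldl (fun (acc : Int) p => if p.1 = p.2 then acc + 1 else acc) 0)
      = (((l.zip l.tail).countP (fun p => decide (p.1 = p.2))) : Int) := by
  have h := PySem.List.foldl_ite_add_one (l := l.zip l.tail)
    (p := fun (p : String × String) => p.1 = p.2) (a := (0 : Int))
  simpa using h

-- ===== VERDICT (by name: the statement is the Claim_ definition above) =====
theorem count_repetitive_elements_py_spec : Claim_equal_count_repetitive_elements_py := by
  intro tasks _ _
  show count_repetitive_elements_py tasks = count_repetitive_elements_py_alt tasks
  set names := tasks.map (fun t => (PySem.Dict.mk t).getD "name" "") with hnames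
  have hA : count_repetitive_elements_py tasks
      = (names.length : Int) - ((PySem.Set.ofList (names.map pvBase)).length : Int) := by
    have h1 : count_repetitive_elements_py tasks
        = (names.foldl
            (fun (st : PySem.Dict String Bool × Int) name =>
              (st.1.insert (pvBase name) true,
                if st.1.contains (pvBase name) then st.2 + 1 else st.2))
            (PySem.Dict.empty, 0)).2 := rfl
    rw [h1, A_eq]
  set bases := names.map pvBase with hbases
  set sb := PySem.List.sorted bases (fun x => x) false with hsb
  have hB : count_repetitive_elements_py_alt tasks
      = (sb.zip sb.tail).foldl (fun (acc : Int) p => if p.1 = p.2 then acc + 1 else acc) 0 := by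
    show ((PySem.List.sorted (tasks.map (fun t =>
        let name := (PySem.Dict.mk t).getD "name" ""
        if name ≠ "" then PySem.List.pyGetD (PySem.Str.split₀ name) 0 "" else "")) (fun x => x) false).zip
        (PySem.List.slice _ (some 1) none)).foldl
        (fun (acc : Int) p => if p.1 = p.2 then acc + 1 else acc) 0 = _
    rw [PySem.List.slice_from_one]
    have : tasks.map (fun t =>
        let name := (PySem.Dict.mk t).getD "name" ""
        if name ≠ "" then PySem.List.pyGetD (PySem.Str.split₀ name) 0 "" else "") = bases := by
      rw [hbases, hnames, List.map_map]; rfl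
    rw [this]
  have hpw : sb.Pairwise (· ≤ ·) := by
    have := PySem.List.sorted_pairwise (xs := bases) (key := fun x => x)
    simpa using this
  have hperm : sb.Perm bases := PySem.List.sorted_perm bases (fun x => x) false
  have hcard : sb.toFinset.card = bases.toFinset.card := by
    rw [List.toFinset_eq_of_perm _ _ hperm]
  have hlen : sb.length = bases.length := hperm.length_eq
  have hadj := adj_plus_distinct sb hpw
  have hlen2 : names.length = bases.length := by simp [hbases]
  rw [hA, hB, B_fold_eq_countP, ofList_length_eq_card]
  omega
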